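-- pv_equiv track=rewrite | github.com/tkdang97/AoC | 2024/Day 22.py | part2
-- ===== SOURCE A (Python) =====
-- from collections import defaultdict, deque
--
-- def evolve(num):
--     mod = 16777216
--     num = ((num * 64) ^ num) % mod
--     num = ((num // 32) ^ num) % mod
--     num = ((num * 2048) ^ num) % mod
--     return num
--
-- def part2(nums):
--     total_map = defaultdict(int)
--     for num in nums:
--         prev_digit = num % 10
--         diffs = deque()
--         seen = set()
--         for _ in range(2000):
--             num = evolve(num)
--             digit = num % 10
--             diffs.append(digit - prev_digit)
--             if len(diffs) > 4:
--                 diffs.popleft()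
--             if len(diffs) == 4:
--                 sequence = tuple(diffs)
--                 if sequence not in seen:
--                     seen.add(sequence)
--                     total_map[sequence] += digit
--             prev_digit = digit
--     return max(total_map.values())
-- ===== SOURCE B (Python) =====
-- def evolve(num):
--     mod = 16777216
--     num = ((num * 64) ^ num) % mod
--     num = ((num // 32) ^ num) % mod
--     num = ((num * 2048) ^ num) % mod
--     return num
--
-- def part2(nums):
--     totals = {}
--     for num in nums:
--         digits = [num % 10]
--         p = num
--         for _ in range(2000):
--             p = evolve(p)
--             digits.append(p % 10)
--         diffs = [b - a for a, b in zip(digits, digits[1:])]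
--         seen = set()
--         for w, price in zip(zip(diffs, diffs[1:], diffs[2:], diffs[3:]), digits[4:]):
--             if w not in seen:
--                 seen.add(w)
--                 totals[w] = totals.get(w, 0) + price
--     return max(totals.values())
-- ===== Notes on version B (the rewrite author's own statement) =====
-- stated objective: alternative
-- what changed: A maintains a sliding deque window, seen-set and totals interleaved inside one evolve loop per seed; B decomposes each seed into three separate passes - build the full 2001-price list, derive the diff list, then zip four offset copies of the diffs into 4-tuples paired with trailing prices - before the first-occurrence accumulation.
import Mathlib
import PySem

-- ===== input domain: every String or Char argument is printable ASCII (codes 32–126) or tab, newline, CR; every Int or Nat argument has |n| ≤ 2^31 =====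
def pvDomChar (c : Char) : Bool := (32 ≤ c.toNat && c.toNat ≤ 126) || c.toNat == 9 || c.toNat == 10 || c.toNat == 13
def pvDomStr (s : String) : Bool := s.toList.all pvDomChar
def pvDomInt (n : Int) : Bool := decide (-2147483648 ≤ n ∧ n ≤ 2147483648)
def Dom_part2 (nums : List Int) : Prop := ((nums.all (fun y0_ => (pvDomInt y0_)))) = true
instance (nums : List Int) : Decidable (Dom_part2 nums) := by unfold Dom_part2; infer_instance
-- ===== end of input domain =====

-- B replaces A's interleaved single pass (deque window maintained while evolving) by three separate
-- differently-shaped passes per seed: build all prices, then the diff list, then zip four offset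
-- copies of it into windows; objective: alternative decomposition (same asymptotic cost).

-- ===== PORT A =====
-- shared module-level helper `evolve` (identical in Source A and Source B)
def evolveFn (num : Int) : Int :=
  let md : Int := 16777216
  let n1 := PySem.Int.mod (PySem.Int.bxor (num * 64) num) md
  let n2 := PySem.Int.mod (PySem.Int.bxor (PySem.Int.floordiv n1 32) n1) md
  PySem.Int.mod (PySem.Int.bxor (n2 * 2048) n2) md

-- body of A's inner `for _ in range(2000)` loop; state = (num, prev_digit, diffs, seen, total_map)
def part2Step
    (st : Int × Int × List Int × Std.HashSet (Int × Int × Int × Int) × Std.HashMap (Int × Int × Int × Int) Int)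
    (_i : Int) :
    Int × Int × List Int × Std.HashSet (Int × Int × Int × Int) × Std.HashMap (Int × Int × Int × Int) Int :=
  let num := evolveFn st.1
  let digit := PySem.Int.mod num 10
  let d1 := st.2.2.1 ++ [digit - st.2.1]
  let d2 := if d1.length > 4 then d1.tail else d1
  let st2 :=
    if d2.length == 4 then
      let seq := (d2.getD 0 0, d2.getD 1 0, d2.getD 2 0, d2.getD 3 0)
      if st.2.2.2.1.contains seq then (st.2.2.2.1, st.2.2.2.2)
      else (st.2.2.2.1.insert seq, st.2.2.2.2.insert seq (st.2.2.2.2.getD seq 0 + digit))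
    else (st.2.2.2.1, st.2.2.2.2)
  (num, digit, d2, st2)

def part2 (nums : List Int) : Int :=
  let tm := nums.foldl (fun tm num =>
      ((PySem.List.pyRange 0 2000 1).foldl part2Step
        (num, PySem.Int.mod num 10, ([] : List Int), (∅ : Std.HashSet (Int × Int × Int × Int)), tm)).2.2.2.2)
    (∅ : Std.HashMap (Int × Int × Int × Int) Int)
  match PySem.List.max? tm.values (fun v => v) with
  | some m => m
  | none => 0   -- unreachable under Pre_part2 (Python's max raises ValueError exactly there)

-- ===== PORT B =====
def part2_alt (nums : List Int) : Int :=
  let totals := nums.foldl (fun totals num =>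
      let digits := ((PySem.List.pyRange 0 2000 1).foldl
          (fun (st : Int × List Int) _ =>
            let p := evolveFn st.1
            (p, st.2 ++ [PySem.Int.mod p 10]))
          (num, [PySem.Int.mod num 10])).2
      let diffs := (digits.zip digits.tail).map (fun ab => ab.2 - ab.1)
      let wins := ((diffs.zip (diffs.drop 1)).zip ((diffs.drop 2).zip (diffs.drop 3))).map
          (fun p => (p.1.1, p.1.2, p.2.1, p.2.2))
      ((wins.zip (digits.drop 4)).foldl
          (fun (st : Std.HashSet (Int × Int × Int × Int) × Std.HashMap (Int × Int × Int × Int) Int) e =>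
            if st.1.contains e.1 then st
            else (st.1.insert e.1, st.2.insert e.1 (st.2.getD e.1 0 + e.2)))
          ((∅ : Std.HashSet (Int × Int × Int × Int)), totals)).2)
    (∅ : Std.HashMap (Int × Int × Int × Int) Int)
  match PySem.List.max? totals.values (fun v => v) with
  | some m => m
  | none => 0

-- ===== PRECONDITION & SPEC =====
-- Pre_ excludes only the empty list, on which Python's max(total_map.values()) raises ValueError.
def Pre_part2 (nums : List Int) : Prop := nums ≠ []
instance (nums : List Int) : Decidable (Pre_part2 nums) := by unfold Pre_part2; infer_instance
def pvWitness_part2 : List Int := ([3])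

def Spec_part2 (nums : List Int) (out : Int) : Prop := out = part2_alt nums
instance (nums : List Int) (out : Int) : Decidable (Spec_part2 nums out) := by unfold Spec_part2; infer_instance

-- ===== CLAIM (what is proved, stated in full; the proofs are below) =====
def Claim_equal_part2 : Prop := ∀ (nums : List Int), Dom_part2 nums → Pre_part2 nums → Spec_part2 nums (part2 nums)

-- ===== LEMMAS AND PROOFS =====

-- the i-th secret number's last digit, the i-th price difference, the window starting at diff j
def dseq (n0 : Int) (i : Nat) : Int := PySem.Int.mod (evolveFn^[i] n0) 10
def dif (n0 : Int) (j : Nat) : Int := dseq n0 (j + 1) - dseq n0 j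
def evKey (n0 : Int) (j : Nat) : Int × Int × Int × Int :=
  (dif n0 j, dif n0 (j + 1), dif n0 (j + 2), dif n0 (j + 3))
-- the stream of (window, price) events the per-seed scan generates within the first k steps
def events (n0 : Int) (k : Nat) : List ((Int × Int × Int × Int) × Int) :=
  (List.range (k - 3)).map (fun j => (evKey n0 j, dseq n0 (j + 4)))
-- first-occurrence accumulation of one event into (seen, totals)
def estep (st : Std.HashSet (Int × Int × Int × Int) × Std.HashMap (Int × Int × Int × Int) Int)
    (e : (Int × Int × Int × Int) × Int) :
    Std.HashSet (Int × Int × Int × Int) × Std.HashMap (Int × Int × Int × Int) Int :=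
  if st.1.contains e.1 then st
  else (st.1.insert e.1, st.2.insert e.1 (st.2.getD e.1 0 + e.2))

lemma foldl_const {α β : Type} (g : α → α) :
    ∀ (l : List β) (init : α), l.foldl (fun s _ => g s) init = g^[l.length] init := by
  intro l
  induction l with
  | nil => intro init; rfl
  | cons x t ih =>
      intro init
      simp [List.foldl_cons, ih, Function.iterate_succ_apply]

lemma window_getD (n0 : Int) (k i : Nat) (hk : 3 ≤ k) (hi : i < 4) :
    (((List.range (k + 1)).map (dif n0)).drop (k - 3)).getD i 0 = dif n0 (k - 3 + i) := by
  rw [List.getD_eq_getElem?_getD, List.getElem?_drop]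
  rw [List.getElem?_map, List.getElem?_range]
  simp
  omega

lemma AseedInv (n0 : Int) (tm0 : Std.HashMap (Int × Int × Int × Int) Int) :
    ∀ k : Nat,
      (fun st => part2Step st 0)^[k]
          (n0, PySem.Int.mod n0 10, ([] : List Int), (∅ : Std.HashSet (Int × Int × Int × Int)), tm0)
        = (evolveFn^[k] n0, dseq n0 k, ((List.range k).map (dif n0)).drop (k - 4),
           (events n0 k).foldl estep ((∅ : Std.HashSet (Int × Int × Int × Int)), tm0)) := by
  intro k
  induction k with
  | zero => simp [dseq, events]
  | succ k ih =>
      rw [Function.iterate_succ_apply', ih]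
      -- unfold one step
      show part2Step _ 0 = _
      have hdig : PySem.Int.mod (evolveFn (evolveFn^[k] n0)) 10 = dseq n0 (k + 1) := by
        rw [dseq, Function.iterate_succ_apply']
      have hd1 : ((List.range k).map (dif n0)).drop (k - 4) ++ [dseq n0 (k+1) - dseq n0 k]
          = ((List.range (k + 1)).map (dif n0)).drop (k - 4) := by
        rw [List.range_succ, List.map_append,
          List.drop_append_of_le_length (by simp)]
        rfl
      have hlen1 : (((List.range (k + 1)).map (dif n0)).drop (k - 4)).length = k + 1 - (k - 4) := by
        simp
      by_cases h4 : 4 ≤ k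
      · -- deque overflows: pop left
        have hd2 : (((List.range (k + 1)).map (dif n0)).drop (k - 4)).tail
            = ((List.range (k + 1)).map (dif n0)).drop (k - 3) := by
          rw [List.tail_drop]; congr 1; omega
        have hlen2 : (((List.range (k + 1)).map (dif n0)).drop (k - 3)).length = 4 := by
          simp; omega
        have hev : events n0 (k + 1) = events n0 k ++ [(evKey n0 (k - 3), dseq n0 (k + 1))] := by
          unfold events
          have h1 : k + 1 - 3 = (k - 3) + 1 := by omega
          have h2 : k - 3 + 4 = k + 1 := by omega
          rw [h1, List.range_succ, List.map_append]
          simp [h2]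
        simp only [part2Step, hdig, hd1, hlen1]
        rw [if_pos (by omega), hd2]
        rw [if_pos (by simp [hlen2])]
        rw [hev, List.foldl_append]
        simp only [List.foldl_cons, List.foldl_nil]
        rw [window_getD n0 k 0 (by omega) (by omega), window_getD n0 k 1 (by omega) (by omega),
            window_getD n0 k 2 (by omega) (by omega), window_getD n0 k 3 (by omega) (by omega)]
        simp only [estep, evKey]
        rw [Function.iterate_succ_apply']
        have h14 : k + 1 - 4 = k - 3 := by omega
        rw [h14]
        simp
      · by_cases h3 : k = 3
        · subst h3
          have hev : events n0 4 = [(evKey n0 0, dseq n0 4)] := by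
            unfold events; rfl
          simp only [part2Step, hdig, hd1, hlen1]
          rw [if_neg (by omega)]
          rw [if_pos (by simp)]
          rw [window_getD n0 3 0 (by omega) (by omega), window_getD n0 3 1 (by omega) (by omega),
              window_getD n0 3 2 (by omega) (by omega), window_getD n0 3 3 (by omega) (by omega)]
          rw [hev]
          simp only [events, List.foldl_cons, List.foldl_nil, estep, evKey]
          rw [Function.iterate_succ_apply']
          norm_num
        · -- k ≤ 2 : window not yet full, no event
          have hev : events n0 (k + 1) = events n0 k := by
            unfold events; congr 2; omega
          simp only [part2Step, hdig, hd1, hlen1]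
          rw [if_neg (by omega), if_neg (by simp; omega), hev]
          rw [Function.iterate_succ_apply']
          have h14 : k + 1 - 4 = k - 4 := by omega
          rw [h14]

lemma Bdigits (n0 : Int) :
    ∀ k : Nat,
      (fun (st : Int × List Int) =>
          let p := evolveFn st.1
          (p, st.2 ++ [PySem.Int.mod p 10]))^[k] (n0, [PySem.Int.mod n0 10])
        = (evolveFn^[k] n0, (List.range (k + 1)).map (dseq n0)) := by
  intro k
  induction k with
  | zero => simp [dseq]
  | succ k ih =>
      rw [Function.iterate_succ_apply', ih]
      simp [List.range_succ, dseq, Function.iterate_succ_apply']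

lemma diffs_eq (n0 : Int) (n : Nat) :
    (let digits := (List.range (n + 1)).map (dseq n0)
     (digits.zip digits.tail).map (fun ab => ab.2 - ab.1)) = (List.range n).map (dif n0) := by
  apply List.ext_getElem
  · simp
  · intro i h1 h2
    simp only [List.getElem_map, List.getElem_zip, List.getElem_range] at *
    simp [List.getElem_tail, dif]

lemma Bevents (n0 : Int) :
    (let digits := (List.range 2001).map (dseq n0)
     let diffs := (digits.zip digits.tail).map (fun ab => ab.2 - ab.1)
     let wins := ((diffs.zip (diffs.drop 1)).zip ((diffs.drop 2).zip (diffs.drop 3))).map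
        (fun p => (p.1.1, p.1.2, p.2.1, p.2.2))
     wins.zip (digits.drop 4)) = events n0 2000 := by
  have hd := diffs_eq n0 2000
  simp only at hd ⊢
  rw [hd]
  apply List.ext_getElem
  · simp only [events, List.length_zip, List.length_map, List.length_drop, List.length_range]
    omega
  · intro i h1 h2
    simp only [events, evKey, List.getElem_zip, List.getElem_drop, List.getElem_map,
      List.getElem_range]
    ring_nf

lemma seed_eq (tm : Std.HashMap (Int × Int × Int × Int) Int) (num : Int) :
    ((PySem.List.pyRange 0 2000 1).foldl part2Step
        (num, PySem.Int.mod num 10, ([] : List Int), (∅ : Std.HashSet (Int × Int × Int × Int)), tm)).2.2.2.2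
    = (let digits := ((PySem.List.pyRange 0 2000 1).foldl
          (fun (st : Int × List Int) _ =>
            let p := evolveFn st.1
            (p, st.2 ++ [PySem.Int.mod p 10]))
          (num, [PySem.Int.mod num 10])).2
       let diffs := (digits.zip digits.tail).map (fun ab => ab.2 - ab.1)
       let wins := ((diffs.zip (diffs.drop 1)).zip ((diffs.drop 2).zip (diffs.drop 3))).map
          (fun p => (p.1.1, p.1.2, p.2.1, p.2.2))
       ((wins.zip (digits.drop 4)).foldl
          (fun (st : Std.HashSet (Int × Int × Int × Int) × Std.HashMap (Int × Int × Int × Int) Int) e =>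
            if st.1.contains e.1 then st
            else (st.1.insert e.1, st.2.insert e.1 (st.2.getD e.1 0 + e.2)))
          ((∅ : Std.HashSet (Int × Int × Int × Int)), tm)).2) := by
  have hlen : (PySem.List.pyRange 0 2000 1).length = 2000 := by
    rw [PySem.List.length_pyRange_one]; decide
  have h1 : (PySem.List.pyRange 0 2000 1).foldl part2Step
        (num, PySem.Int.mod num 10, ([] : List Int), (∅ : Std.HashSet (Int × Int × Int × Int)), tm)
      = (fun st => part2Step st 0)^[2000]
        (num, PySem.Int.mod num 10, ([] : List Int), (∅ : Std.HashSet (Int × Int × Int × Int)), tm) := by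
    rw [← hlen]; exact foldl_const _ _ _
  have h2 : (PySem.List.pyRange 0 2000 1).foldl
        (fun (st : Int × List Int) _ =>
          let p := evolveFn st.1
          (p, st.2 ++ [PySem.Int.mod p 10]))
        (num, [PySem.Int.mod num 10])
      = (fun (st : Int × List Int) =>
          let p := evolveFn st.1
          (p, st.2 ++ [PySem.Int.mod p 10]))^[2000] (num, [PySem.Int.mod num 10]) := by
    rw [← hlen]; exact foldl_const _ _ _
  rw [h1, AseedInv num tm 2000]
  simp only [h2, Bdigits num 2000]
  rw [Bevents num]
  rfl

-- ===== VERDICT (by name: the statement is the Claim_ definition above) =====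
theorem part2_spec : Claim_equal_part2 := by
  intro nums _ _
  unfold Spec_part2 part2 part2_alt
  have h : ∀ (tm : Std.HashMap (Int × Int × Int × Int) Int),
      nums.foldl (fun tm num =>
        ((PySem.List.pyRange 0 2000 1).foldl part2Step
          (num, PySem.Int.mod num 10, ([] : List Int), (∅ : Std.HashSet (Int × Int × Int × Int)), tm)).2.2.2.2) tm
      = nums.foldl (fun totals num =>
          let digits := ((PySem.List.pyRange 0 2000 1).foldl
              (fun (st : Int × List Int) _ =>
                let p := evolveFn st.1
                (p, st.2 ++ [PySem.Int.mod p 10]))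
              (num, [PySem.Int.mod num 10])).2
          let diffs := (digits.zip digits.tail).map (fun ab => ab.2 - ab.1)
          let wins := ((diffs.zip (diffs.drop 1)).zip ((diffs.drop 2).zip (diffs.drop 3))).map
              (fun p => (p.1.1, p.1.2, p.2.1, p.2.2))
          ((wins.zip (digits.drop 4)).foldl
              (fun (st : Std.HashSet (Int × Int × Int × Int) × Std.HashMap (Int × Int × Int × Int) Int) e =>
                if st.1.contains e.1 then st
                else (st.1.insert e.1, st.2.insert e.1 (st.2.getD e.1 0 + e.2)))
              ((∅ : Std.HashSet (Int × Int × Int × Int)), totals)).2) tm := by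
    intro tm
    apply PySem.List.foldl_congr_mem
    intro acc x _
    exact seed_eq acc x
  rw [h]
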